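-- pv_equiv track=rewrite | github.com/Dev-Zisko/OwnEncryptionDecryption-Apr13-2021 | Dencry/dencry.py | convertMessageToArray
-- ===== SOURCE A (Python) =====
-- def convertMessageToArray(message, numbersecret):
--     i = 0
--     count = 0
--     convert = []
--     cut = ""
--     while(i < len(message)):
--         if(count < 3):
--             cut = cut + message[i]
--             count += 1
--         if(count == 3):
--             convert.append(cut)
--             cut = ""
--             count = 0
--         i += 1
--     ns = int(numbersecret) * 2
--     i = ns
--     state = True
--     msg = []
--     count = 0
--     while(i < len(convert)):
--         if(state):
--             msg.append(convert[i])
--             count += 1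
--             if(count == int(numbersecret)):
--                 state = False
--                 count = 0
--         else:
--             count += 1
--             if(count == ns):
--                 state = True
--                 count = 0
--         i += 1
--     return msg
-- ===== SOURCE B (Python) =====
-- def convertMessageToArray(message, numbersecret):
--     n = int(numbersecret)
--     chunks = [message[j:j+3] for j in range(0, len(message) // 3 * 3, 3)]
--     if n <= 0:
--         return chunks
--     result = []
--     i = 2 * n
--     while i < len(chunks):
--         result.extend(chunks[i:i+n])
--         i += 3 * n
--     return result
-- ===== Notes on version B (the rewrite author's own statement) =====
-- stated objective: simpler
-- what changed: A's char-by-char state machine (count/cut buffers, then a take/skip boolean state machine stepping one chunk at a time) is replaced by a slicing comprehension for the triples and a block-stride loop that slices n chunks at i and jumps i += 3*n directly over the skipped region (with n <= 0 returning all chunks, matching A at numbersecret = 0).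
-- outside the precondition, e.g. on convertMessageToArray('abcdef', -1): A returns ['abc', 'def', 'abc', 'def'], B returns ['abc', 'def']; on convertMessageToArray('abc', -3): A raises IndexError, B returns ['abc']
import Mathlib
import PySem

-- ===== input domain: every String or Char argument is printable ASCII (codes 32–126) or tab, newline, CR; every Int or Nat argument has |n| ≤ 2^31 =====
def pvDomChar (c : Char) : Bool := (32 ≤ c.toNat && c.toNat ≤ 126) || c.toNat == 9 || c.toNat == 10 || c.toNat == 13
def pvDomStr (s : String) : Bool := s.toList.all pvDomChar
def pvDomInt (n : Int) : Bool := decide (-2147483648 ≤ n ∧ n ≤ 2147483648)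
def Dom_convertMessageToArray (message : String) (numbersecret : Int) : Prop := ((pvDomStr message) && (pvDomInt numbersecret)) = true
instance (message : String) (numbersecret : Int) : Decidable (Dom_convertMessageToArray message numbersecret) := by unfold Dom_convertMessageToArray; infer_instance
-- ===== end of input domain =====

-- B replaces A's character/chunk state machines by a slicing comprehension plus a block-stride
-- loop that jumps directly over the skipped chunks (objective: simpler).


-- ===== PORT A =====
-- first while loop of A: build the list of 3-char chunks char by char (strings as char lists)
def cmtaBuild (chars : List Char) (count : Int) (convert : List String) (cut : List Char) : List String :=
  match chars with
  | [] => convert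
  | c :: rest =>
    let p := if count < 3 then (count + 1, cut ++ [c]) else (count, cut)
    if p.1 == 3 then cmtaBuild rest 0 (convert ++ [String.ofList p.2]) []
    else cmtaBuild rest p.1 convert p.2

-- second while loop of A: the take/skip state machine over the chunk list; 'fuel' only makes the
-- loop total in Lean (it is called with enough fuel for every admitted input, i starts at ns ≥ 0)
def cmtaSelect (convert : List String) (n ns : Int) (fuel : Nat) (i : Int) (state : Bool) (count : Int) (msg : List String) : List String :=
  match fuel with
  | 0 => msg
  | fuel + 1 =>
    if i < (convert.length : Int) then
      if state then
        let msg' := msg ++ [(PySem.List.pyGet? convert i).getD ""]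
        let count' := count + 1
        if count' == n then cmtaSelect convert n ns fuel (i+1) false 0 msg'
        else cmtaSelect convert n ns fuel (i+1) true count' msg'
      else
        let count' := count + 1
        if count' == ns then cmtaSelect convert n ns fuel (i+1) true 0 msg
        else cmtaSelect convert n ns fuel (i+1) false count' msg
    else msg

def convertMessageToArray (message : String) (numbersecret : Int) : List String :=
  let convert := cmtaBuild message.toList 0 [] []
  let ns := numbersecret * 2
  cmtaSelect convert numbersecret ns convert.length ns true 0 []

-- ===== PORT B =====
-- chunks = [message[j:j+3] for j in range(0, len(message)//3*3, 3)] (written over chunk indices)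
def cmtaChunks (message : String) : List String :=
  (PySem.List.pyRange 0 (PySem.Int.floordiv (PySem.Str.len message) 3) 1).map
    (fun j => String.ofList (PySem.List.slice message.toList (some (j*3)) (some (j*3+3))))

-- the block-stride while loop of Source B; 'fuel' only makes the loop total in Lean (called with
-- enough fuel: i starts at 2n ≥ 2 and grows by 3n ≥ 3 each round)
def cmtaBlocks (chunks : List String) (n : Int) (fuel : Nat) (i : Int) (result : List String) : List String :=
  match fuel with
  | 0 => result
  | fuel + 1 =>
    if i < (chunks.length : Int) then
      cmtaBlocks chunks n fuel (i + 3*n) (result ++ PySem.List.slice chunks (some i) (some (i+n)))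
    else result

def convertMessageToArray_alt (message : String) (numbersecret : Int) : List String :=
  let chunks := cmtaChunks message
  if numbersecret ≤ 0 then chunks
  else cmtaBlocks chunks numbersecret chunks.length (2 * numbersecret) []

-- ===== PRECONDITION & SPEC =====
-- Pre_ excludes negative numbersecret only: there A either raises IndexError or selects chunks
-- through Python's negative-index wraparound, an accident of the implementation no caller relies on
-- (B returns its block selection / all chunks there).
def Pre_convertMessageToArray (message : String) (numbersecret : Int) : Prop := 0 ≤ numbersecret
instance (message : String) (numbersecret : Int) : Decidable (Pre_convertMessageToArray message numbersecret) := by unfold Pre_convertMessageToArray; infer_instance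
def pvWitness_convertMessageToArray : String × Int := ("abcdef", 1)

def Spec_convertMessageToArray (message : String) (numbersecret : Int) (out : List String) : Prop := out = convertMessageToArray_alt message numbersecret
instance (message : String) (numbersecret : Int) (out : List String) : Decidable (Spec_convertMessageToArray message numbersecret out) := by unfold Spec_convertMessageToArray; infer_instance

-- ===== CLAIM (what is proved, stated in full; the proofs are below) =====
def Claim_equal_convertMessageToArray : Prop := ∀ (message : String) (numbersecret : Int), Dom_convertMessageToArray message numbersecret → Pre_convertMessageToArray message numbersecret → Spec_convertMessageToArray message numbersecret (convertMessageToArray message numbersecret)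

-- ===== LEMMAS AND PROOFS =====

theorem chunks_cons (a b c : Char) (rest : List Char) :
    cmtaChunks (String.ofList (a::b::c::rest))
      = String.ofList [a,b,c] :: cmtaChunks (String.ofList rest) := by
  unfold cmtaChunks
  have hlen : ∀ l : List Char, PySem.Str.len (String.ofList l) = (l.length : Int) := by
    intro l; simp [PySem.Str.len_eq]
  rw [hlen, hlen]
  have h1 : ((a::b::c::rest).length : Int) = ((rest.length + 3 : Nat) : Int) := by simp; omega
  have h2 : PySem.Int.floordiv ((rest.length + 3 : Nat) : Int) 3 = ((rest.length/3 + 1 : Nat) : Int) := by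
    have := PySem.Int.floordiv_natCast (rest.length + 3) 3
    rw [show ((3:Nat):Int) = (3:Int) by norm_cast] at this
    rw [this, Nat.add_div_right _ (by norm_num)]
  have h3 : PySem.Int.floordiv ((rest.length : Nat) : Int) 3 = ((rest.length/3 : Nat) : Int) := by
    have := PySem.Int.floordiv_natCast rest.length 3
    rw [show ((3:Nat):Int) = (3:Int) by norm_cast] at this
    rw [this]
  rw [h1, h2, h3, PySem.List.pyRange_zero_natCast, PySem.List.pyRange_zero_natCast,
      List.range_succ_eq_map]
  simp only [List.map_cons, List.map_map, String.toList_ofList]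
  congr 1
  apply List.map_congr_left
  intro k hk
  simp only [Function.comp]
  have e1 : ((Nat.succ k : Nat) : Int) * 3 = ((3*k+3 : Nat) : Int) := by push_cast; ring
  have e2 : ((3*k+3 : Nat) : Int) + 3 = ((3*k+6 : Nat) : Int) := by push_cast; ring
  have e3 : ((k:Nat):Int) * 3 = ((3*k : Nat) : Int) := by push_cast; ring
  have e4 : ((3*k : Nat) : Int) + 3 = ((3*k+3 : Nat) : Int) := by push_cast; ring
  rw [e1, e2, e3, e4, PySem.List.slice_natCast, PySem.List.slice_natCast]
  congr 1
  rw [show 3*k+6 - (3*k+3) = 3 by omega, show 3*k+3 - 3*k = 3 by omega]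
  rw [show 3*k+3 = 3 + 3*k by omega, ← List.drop_drop]
  rfl

theorem chunks_short (l : List Char) (h : l.length < 3) : cmtaChunks (String.ofList l) = [] := by
  unfold cmtaChunks
  have hlen : PySem.Str.len (String.ofList l) = (l.length : Int) := by simp [PySem.Str.len_eq]
  rw [hlen]
  have h3 : PySem.Int.floordiv ((l.length : Nat) : Int) 3 = ((l.length/3 : Nat) : Int) := by
    have := PySem.Int.floordiv_natCast l.length 3
    rw [show ((3:Nat):Int) = (3:Int) by norm_cast] at this
    rw [this]
  rw [h3, show l.length / 3 = 0 by omega]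
  simp

theorem cmtaBuild_eq : ∀ (l : List Char) (conv : List String),
    cmtaBuild l 0 conv [] = conv ++ cmtaChunks (String.ofList l)
  | [], conv => by rw [chunks_short [] (by simp)]; simp [cmtaBuild]
  | [a], conv => by rw [chunks_short [a] (by simp)]; simp [cmtaBuild]
  | [a,b], conv => by rw [chunks_short [a,b] (by simp)]; simp [cmtaBuild]
  | a::b::c::rest, conv => by
      rw [chunks_cons]
      have ih := cmtaBuild_eq rest (conv ++ [String.ofList [a,b,c]])
      have step : cmtaBuild (a::b::c::rest) 0 conv []
          = cmtaBuild rest 0 (conv ++ [String.ofList [a,b,c]]) [] := by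
        simp [cmtaBuild]
      rw [step, ih]
      simp

theorem cmtaBlocks_acc (chunks : List String) (n : Int) (fuel : Nat) :
    ∀ (i : Int) (res : List String),
      cmtaBlocks chunks n fuel i res = res ++ cmtaBlocks chunks n fuel i [] := by
  induction fuel with
  | zero => intro i res; simp [cmtaBlocks]
  | succ f ih =>
    intro i res
    by_cases h : i < (chunks.length : Int)
    · simp only [cmtaBlocks, if_pos h]
      rw [ih (i+3*n) (res ++ PySem.List.slice chunks (some i) (some (i+n))),
          ih (i+3*n) ([] ++ PySem.List.slice chunks (some i) (some (i+n)))]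
      simp
    · simp [cmtaBlocks, if_neg h]

theorem cmtaBlocks_stop (chunks : List String) (n : Int) (fuel : Nat) (i : Int) (res : List String)
    (h : ¬ i < (chunks.length : Int)) : cmtaBlocks chunks n fuel i res = res := by
  cases fuel with
  | zero => rfl
  | succ f => simp [cmtaBlocks, if_neg h]

-- any two sufficient fuels compute the same result
theorem cmtaBlocks_fuelinv (chunks : List String) (n : Int) (hn : 1 ≤ n) :
    ∀ (fuel fuel' : Nat) (i : Int) (res : List String),
      (chunks.length : Int) ≤ i + fuel → (chunks.length : Int) ≤ i + fuel' →
      cmtaBlocks chunks n fuel i res = cmtaBlocks chunks n fuel' i res := by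
  intro fuel
  induction fuel with
  | zero =>
    intro fuel' i res h h'
    rw [cmtaBlocks_stop chunks n 0 i res (by push_cast at h ⊢; omega),
        cmtaBlocks_stop chunks n fuel' i res (by push_cast at h ⊢; omega)]
  | succ f ih =>
    intro fuel' i res h h'
    by_cases hi : i < (chunks.length : Int)
    · have hf' : ∃ g, fuel' = g + 1 := by
        cases fuel' with
        | zero => exfalso; push_cast at h'; omega
        | succ g => exact ⟨g, rfl⟩
      obtain ⟨g, rfl⟩ := hf'
      simp only [cmtaBlocks, if_pos hi]
      exact ih g (i+3*n) _ (by push_cast at h ⊢; omega) (by push_cast at h' ⊢; omega)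
    · rw [cmtaBlocks_stop chunks n _ i res hi, cmtaBlocks_stop chunks n fuel' i res hi]

theorem slice_past {α : Type} (chunks : List α) (a b : Int) (ha : 0 ≤ a) (hb : 0 ≤ b)
    (hlen : (chunks.length : Int) ≤ a) :
    PySem.List.slice chunks (some a) (some b) = [] := by
  rw [PySem.List.slice_toNat _ ha hb, List.drop_eq_nil_of_le (by omega), List.take_nil]

-- one unfolding of the block loop at canonical fuel = chunks.length
theorem cmtaBlocks_step (chunks : List String) (n i : Int) (hn : 1 ≤ n) (hi : 0 ≤ i)
    (msg : List String) :
    cmtaBlocks chunks n chunks.length i msg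
      = msg ++ PySem.List.slice chunks (some i) (some (i+n))
          ++ cmtaBlocks chunks n chunks.length (i + 3*n) [] := by
  by_cases h : i < (chunks.length : Int)
  · have hf : ∃ g, chunks.length = g + 1 := by
      cases hL : chunks.length with
      | zero => exfalso; rw [hL] at h; push_cast at h; omega
      | succ g => exact ⟨g, rfl⟩
    obtain ⟨g, hg⟩ := hf
    conv_lhs => rw [hg]
    simp only [cmtaBlocks, if_pos h]
    rw [cmtaBlocks_acc chunks n g (i+3*n) (msg ++ PySem.List.slice chunks (some i) (some (i+n)))]
    rw [cmtaBlocks_fuelinv chunks n hn g chunks.length (i+3*n) []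
          (by push_cast; try omega) (by push_cast; try omega)]
  · rw [cmtaBlocks_stop _ _ _ _ _ h, cmtaBlocks_stop _ _ _ _ _ (by omega),
        slice_past chunks i (i+n) hi (by omega) (by omega)]
    simp

theorem slice_cons_decomp {α : Type} [Inhabited α] (l : List α) (a b : Int) (h0 : 0 ≤ a)
    (hl : a < (l.length : Int)) (hab : a < b) :
    PySem.List.slice l (some a) (some b)
      = l[a.toNat]'(by omega) :: PySem.List.slice l (some (a+1)) (some b) := by
  rw [PySem.List.slice_toNat _ h0 (by omega), PySem.List.slice_toNat _ (by omega) (by omega),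
      List.drop_eq_getElem_cons (by omega : a.toNat < l.length)]
  rw [show b.toNat - a.toNat = (b.toNat - (a+1).toNat) + 1 by omega,
      show (a+1).toNat = a.toNat + 1 by omega, List.take_succ_cons]

theorem slice_empty_ab {α : Type} (l : List α) (a b : Int) (h0 : 0 ≤ a) (hbn : 0 ≤ b)
    (hb : b ≤ a) : PySem.List.slice l (some a) (some b) = [] := by
  rw [PySem.List.slice_toNat _ h0 hbn, show b.toNat - a.toNat = 0 by omega, List.take_zero]

-- the two phases of A's selection machine, against the block loop at fuel = conv.length
theorem cmtaSelect_phases (conv : List String) (n : Int) (hn : 1 ≤ n) :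
    ∀ (fuel : Nat) (i c : Int) (msg : List String), 0 ≤ i → 0 ≤ c →
      (conv.length : Int) ≤ i + fuel →
    (c < n → cmtaSelect conv n (n*2) fuel i true c msg
        = msg ++ PySem.List.slice conv (some i) (some (i + (n - c)))
            ++ cmtaBlocks conv n conv.length (i + 3*n - c) []) ∧
    (c < n*2 → cmtaSelect conv n (n*2) fuel i false c msg
        = cmtaBlocks conv n conv.length (i + (n*2 - c)) msg) := by
  intro fuel
  induction fuel with
  | zero =>
    intro i c msg hi hc hfl
    have h : ¬ i < (conv.length : Int) := by push_cast at hfl; omega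
    constructor
    · intro hcn
      rw [show cmtaSelect conv n (n*2) 0 i true c msg = msg from rfl,
          slice_past conv i (i + (n - c)) hi (by omega) (by omega),
          cmtaBlocks_stop conv n conv.length (i + 3*n - c) [] (by omega)]
      simp
    · intro hc2
      rw [show cmtaSelect conv n (n*2) 0 i false c msg = msg from rfl,
          cmtaBlocks_stop conv n conv.length (i + (n*2 - c)) msg (by omega)]
  | succ f ih =>
    intro i c msg hi hc hfl
    by_cases h : i < (conv.length : Int)
    · constructor
      · intro hcn
        have hg := PySem.List.pyGet?_eq_some_getElem conv hi h
        conv_lhs => rw [cmtaSelect]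
        rw [if_pos h]
        simp only [if_true, hg, Option.getD_some]
        by_cases hq : c + 1 = n
        · simp only [beq_iff_eq, hq]
          have ihh := (ih (i+1) 0 (msg ++ [conv[i.toNat]'(by omega)]) (by omega) (by omega)
            (by push_cast at hfl ⊢; omega)).2 (by omega)
          rw [ihh, cmtaBlocks_acc]
          rw [slice_cons_decomp conv i (i + (n - c)) hi h (by omega),
              slice_empty_ab conv (i+1) (i + (n - c)) (by omega) (by omega) (by omega),
              show i + 3*n - c = i + 1 + (n*2 - 0) by omega]
          simp
        · rw [if_neg (by simpa using hq)]
          have ihh := (ih (i+1) (c+1) (msg ++ [conv[i.toNat]'(by omega)]) (by omega) (by omega)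
            (by push_cast at hfl ⊢; omega)).1 (by omega)
          rw [ihh, slice_cons_decomp conv i (i + (n - c)) hi h (by omega),
              show i + 1 + (n - (c+1)) = i + (n - c) by omega,
              show i + 1 + 3*n - (c+1) = i + 3*n - c by omega]
          simp
      · intro hc2
        conv_lhs => rw [cmtaSelect]
        rw [if_pos h]
        simp only [Bool.false_eq_true, if_false]
        by_cases hq : c + 1 = n*2
        · simp only [beq_iff_eq, hq]
          have ihh := (ih (i+1) 0 msg (by omega) (by omega)
            (by push_cast at hfl ⊢; omega)).1 (by omega)
          rw [ihh, show i + (n*2 - c) = i + 1 by omega,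
              cmtaBlocks_step conv n (i+1) hn (by omega) msg]
          simp
        · rw [if_neg (by simpa using hq)]
          have ihh := (ih (i+1) (c+1) msg (by omega) (by omega)
            (by push_cast at hfl ⊢; omega)).2 (by omega)
          rw [ihh, show i + 1 + (n*2 - (c+1)) = i + (n*2 - c) by omega]
    · constructor
      · intro hcn
        rw [cmtaSelect, if_neg h,
            slice_past conv i (i + (n - c)) hi (by omega) (by omega),
            cmtaBlocks_stop conv n conv.length (i + 3*n - c) [] (by omega)]
        simp
      · intro hc2
        rw [cmtaSelect, if_neg h, cmtaBlocks_stop conv n conv.length (i + (n*2 - c)) msg (by omega)]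

-- with numbersecret = 0 the skip branch never fires: A appends every remaining chunk
theorem cmtaSelect_zero (conv : List String) :
    ∀ (fuel : Nat) (i c : Int) (msg : List String), 0 ≤ i → 0 ≤ c →
      (conv.length : Int) ≤ i + fuel →
      cmtaSelect conv 0 0 fuel i true c msg = msg ++ conv.drop i.toNat := by
  intro fuel
  induction fuel with
  | zero =>
    intro i c msg hi hc hfl
    rw [show cmtaSelect conv 0 0 0 i true c msg = msg from rfl,
        List.drop_eq_nil_of_le (by push_cast at hfl; omega)]
    simp
  | succ f ih =>
    intro i c msg hi hc hfl
    by_cases h : i < (conv.length : Int)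
    · have hg := PySem.List.pyGet?_eq_some_getElem conv hi h
      rw [cmtaSelect, if_pos h]
      simp only [if_true, hg, Option.getD_some]
      rw [if_neg (by simpa using (by omega : ¬ c + 1 = (0:Int)))]
      rw [ih (i+1) (c+1) _ (by omega) (by omega) (by push_cast at hfl ⊢; omega)]
      rw [show (i+1).toNat = i.toNat + 1 by omega,
          List.drop_eq_getElem_cons (by omega : i.toNat < conv.length)]
      simp
    · rw [cmtaSelect, if_neg h, List.drop_eq_nil_of_le (by omega)]
      simp

-- ===== VERDICT (by name: the statement is the Claim_ definition above) =====
theorem convertMessageToArray_spec : Claim_equal_convertMessageToArray := by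
  intro message n _ hp
  unfold Pre_convertMessageToArray at hp
  unfold Spec_convertMessageToArray convertMessageToArray convertMessageToArray_alt
  have hb := cmtaBuild_eq message.toList []
  rw [String.ofList_toList] at hb
  simp only [List.nil_append] at hb
  rw [hb]
  by_cases h0 : n = 0
  · subst h0
    rw [if_pos le_rfl]
    rw [show (0:Int) * 2 = 0 by ring,
        cmtaSelect_zero _ _ 0 0 [] le_rfl le_rfl (by push_cast; omega)]
    simp
  · have hn : 1 ≤ n := by omega
    rw [if_neg (by omega)]
    have ph := (cmtaSelect_phases (cmtaChunks message) n hn (cmtaChunks message).length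
        (n*2) 0 [] (by omega) le_rfl (by push_cast; omega)).1 (by omega)
    rw [ph, show (2*n : Int) = n*2 by ring,
        cmtaBlocks_step (cmtaChunks message) n (n*2) hn (by omega) [],
        show (n*2 + (n - 0) : Int) = n*2 + n by ring,
        show (n*2 + 3*n - 0 : Int) = n*2 + 3*n by ring]
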